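-- pv_equiv track=rewrite | github.com/Ileices/TheOrganism | advanced_rby_spectral_compressor.py | _get_optimal_fractal_level
-- ===== SOURCE A (Python) =====
-- from enum import Enum
--
-- class FractalLevel(Enum):
--     """Fractal levels for RBY compression (3^n progression)"""
--     LEVEL_1 = 3       # 3 bins
--     LEVEL_2 = 9       # 9 bins
--     LEVEL_3 = 27      # 27 bins
--     LEVEL_4 = 81      # 81 bins
--     LEVEL_5 = 243     # 243 bins
--     LEVEL_6 = 729     # 729 bins
--     LEVEL_7 = 2187    # 2187 bins
--     LEVEL_8 = 6561    # 6561 bins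
--     LEVEL_9 = 19683   # 19683 bins
--     LEVEL_10 = 59049  # 59049 bins
--     LEVEL_11 = 177147 # 177147 bins
--     LEVEL_12 = 531441 # 531441 bins
--
-- def _get_optimal_fractal_level(data_size: int) -> int:
--     """Get optimal fractal level for data size"""
--
--     fractal_levels = [level.value for level in FractalLevel]
--
--     for level in fractal_levels:
--         if level >= data_size:
--             return level
--
--     # If data exceeds all predefined levels, calculate next 3^n level
--     n = len(fractal_levels) + 1
--     while 3**n < data_size:
--         n += 1
--
--     return 3**n
-- ===== SOURCE B (Python) =====
-- def _get_optimal_fractal_level(data_size: int) -> int: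
--     """Get optimal fractal level for data size"""
--     level = 3
--     while level < data_size:
--         level *= 3
--     return level
-- ===== Notes on version B (the rewrite author's own statement) =====
-- stated objective: simpler
-- what changed: Replaces A's enum-table build plus linear scan with exponent fallback by a single multiplicative while loop starting at 3.
import Mathlib
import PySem

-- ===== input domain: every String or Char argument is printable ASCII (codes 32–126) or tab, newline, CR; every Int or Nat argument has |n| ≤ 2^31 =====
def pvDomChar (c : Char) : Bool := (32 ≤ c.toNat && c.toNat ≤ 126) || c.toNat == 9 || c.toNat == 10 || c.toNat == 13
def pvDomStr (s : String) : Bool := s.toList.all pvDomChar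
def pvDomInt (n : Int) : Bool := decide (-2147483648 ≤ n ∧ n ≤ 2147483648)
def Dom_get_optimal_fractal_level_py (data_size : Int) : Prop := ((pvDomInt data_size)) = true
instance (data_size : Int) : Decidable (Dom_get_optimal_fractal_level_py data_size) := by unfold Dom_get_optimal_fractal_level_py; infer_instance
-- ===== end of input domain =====

-- B replaces A's enum-table build + scan + exponent fallback by one multiplicative while loop (simpler).
-- ===== PORT A =====
-- literal transliteration of A: build the level table, scan for the first entry ≥ data_size,
-- else fall back to the 3^n loop starting at n = len(table)+1 = 13
def pvFractalLevels : List Int := [3, 9, 27, 81, 243, 729, 2187, 6561, 19683, 59049, 177147, 531441]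

-- the for-loop with early return
def pvScanLevels (data_size : Int) : List Int → Option Int
  | [] => none
  | l :: ls => if l ≥ data_size then some l else pvScanLevels data_size ls

-- the 'while 3**n < data_size: n += 1' fallback (n ≥ 13 in A, so a Nat exponent is exact)
def pvALoop (data_size : Int) (n : Nat) : Int :=
  if (3:Int) ^ n < data_size then pvALoop data_size (n + 1) else (3:Int) ^ n
termination_by (data_size - (3:Int) ^ n).toNat
decreasing_by
  have h1 : (3:Int) ^ n < (3:Int) ^ (n + 1) := by
    have := pow_lt_pow_right₀ (by norm_num : (1:Int) < 3) (Nat.lt_succ_self n)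
    simpa using this
  omega

def get_optimal_fractal_level_py (data_size : Int) : Int :=
  match pvScanLevels data_size pvFractalLevels with
  | some l => l
  | none => pvALoop data_size (pvFractalLevels.length + 1)

-- ===== PORT B =====
-- B: level = 3; while level < data_size: level *= 3; return level
def pvBLoop (data_size level : Int) (h : 0 < level) : Int :=
  if level < data_size then pvBLoop data_size (3 * level) (by positivity) else level
termination_by (data_size - level).toNat
decreasing_by omega

def get_optimal_fractal_level_py_alt (data_size : Int) : Int :=
  pvBLoop data_size 3 (by norm_num)

-- ===== PRECONDITION & SPEC =====
def Spec_get_optimal_fractal_level_py (data_size : Int) (out : Int) : Prop := out = get_optimal_fractal_level_py_alt data_size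
instance (data_size : Int) (out : Int) : Decidable (Spec_get_optimal_fractal_level_py data_size out) := by unfold Spec_get_optimal_fractal_level_py; infer_instance

-- ===== CLAIM (what is proved, stated in full; the proofs are below) =====
def Claim_equal_get_optimal_fractal_level_py : Prop := ∀ (data_size : Int), Dom_get_optimal_fractal_level_py data_size → Spec_get_optimal_fractal_level_py data_size (get_optimal_fractal_level_py data_size)

-- ===== LEMMAS AND PROOFS =====

lemma pvALoop_stop {d : Int} {n : Nat} (h : ¬ (3:Int) ^ n < d) : pvALoop d n = (3:Int) ^ n := by
  rw [pvALoop, if_neg h]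

lemma pvALoop_step {d : Int} {n : Nat} (h : (3:Int) ^ n < d) : pvALoop d n = pvALoop d (n + 1) := by
  rw [pvALoop, if_pos h]

-- B's loop, started at a power of three, is A's fallback loop
lemma pvBLoop_eq_pvALoop (d : Int) (n : Nat) (h : 0 < (3:Int) ^ n) :
    pvBLoop d ((3:Int) ^ n) h = pvALoop d n := by
  induction n using pvALoop.induct d with
  | case1 n hlt ih =>
      rw [pvBLoop, if_pos hlt, pvALoop, if_pos hlt]
      have hpow : 3 * (3:Int) ^ n = (3:Int) ^ (n + 1) := by ring
      -- rewrite the argument to 3^(n+1) and close with ih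
      have := ih (by positivity)
      calc pvBLoop d (3 * (3:Int) ^ n) (by positivity)
          = pvBLoop d ((3:Int) ^ (n + 1)) (by positivity) := by congr 1
        _ = pvALoop d (n + 1) := this
  | case2 n hge =>
      rw [pvBLoop, if_neg hge, pvALoop, if_neg hge]

-- ===== VERDICT (by name: the statement is the Claim_ definition above) =====
theorem get_optimal_fractal_level_py_spec : Claim_equal_get_optimal_fractal_level_py := by
  intro d _
  show get_optimal_fractal_level_py d = get_optimal_fractal_level_py_alt d
  have hB : get_optimal_fractal_level_py_alt d = pvALoop d 1 := by
    have := pvBLoop_eq_pvALoop d 1 (by norm_num)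
    simpa [get_optimal_fractal_level_py_alt] using this
  rw [hB]
  unfold get_optimal_fractal_level_py pvFractalLevels
  by_cases h1 : (3:Int) ≥ d
  · simp only [pvScanLevels, if_pos h1]
    rw [pvALoop_stop (show ¬ (3:Int)^1 < d by norm_num; omega)]
    norm_num
  ·
    by_cases h2 : (9:Int) ≥ d
    · simp only [pvScanLevels, if_neg h1, if_pos h2]
      rw [pvALoop_step (show (3:Int)^1 < d by norm_num; omega), pvALoop_stop (show ¬ (3:Int)^2 < d by norm_num; omega)]
      norm_num
    ·
      by_cases h3 : (27:Int) ≥ d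
      · simp only [pvScanLevels, if_neg h1, if_neg h2, if_pos h3]
        rw [pvALoop_step (show (3:Int)^1 < d by norm_num; omega), pvALoop_step (show (3:Int)^2 < d by norm_num; omega), pvALoop_stop (show ¬ (3:Int)^3 < d by norm_num; omega)]
        norm_num
      ·
        by_cases h4 : (81:Int) ≥ d
        · simp only [pvScanLevels, if_neg h1, if_neg h2, if_neg h3, if_pos h4]
          rw [pvALoop_step (show (3:Int)^1 < d by norm_num; omega), pvALoop_step (show (3:Int)^2 < d by norm_num; omega), pvALoop_step (show (3:Int)^3 < d by norm_num; omega), pvALoop_stop (show ¬ (3:Int)^4 < d by norm_num; omega)]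
          norm_num
        ·
          by_cases h5 : (243:Int) ≥ d
          · simp only [pvScanLevels, if_neg h1, if_neg h2, if_neg h3, if_neg h4, if_pos h5]
            rw [pvALoop_step (show (3:Int)^1 < d by norm_num; omega), pvALoop_step (show (3:Int)^2 < d by norm_num; omega), pvALoop_step (show (3:Int)^3 < d by norm_num; omega), pvALoop_step (show (3:Int)^4 < d by norm_num; omega), pvALoop_stop (show ¬ (3:Int)^5 < d by norm_num; omega)]
            norm_num
          ·
            by_cases h6 : (729:Int) ≥ d
            · simp only [pvScanLevels, if_neg h1, if_neg h2, if_neg h3, if_neg h4, if_neg h5, if_pos h6]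
              rw [pvALoop_step (show (3:Int)^1 < d by norm_num; omega), pvALoop_step (show (3:Int)^2 < d by norm_num; omega), pvALoop_step (show (3:Int)^3 < d by norm_num; omega), pvALoop_step (show (3:Int)^4 < d by norm_num; omega), pvALoop_step (show (3:Int)^5 < d by norm_num; omega), pvALoop_stop (show ¬ (3:Int)^6 < d by norm_num; omega)]
              norm_num
            ·
              by_cases h7 : (2187:Int) ≥ d
              · simp only [pvScanLevels, if_neg h1, if_neg h2, if_neg h3, if_neg h4, if_neg h5, if_neg h6, if_pos h7]
                rw [pvALoop_step (show (3:Int)^1 < d by norm_num; omega), pvALoop_step (show (3:Int)^2 < d by norm_num; omega), pvALoop_step (show (3:Int)^3 < d by norm_num; omega), pvALoop_step (show (3:Int)^4 < d by norm_num; omega), pvALoop_step (show (3:Int)^5 < d by norm_num; omega), pvALoop_step (show (3:Int)^6 < d by norm_num; omega), pvALoop_stop (show ¬ (3:Int)^7 < d by norm_num; omega)]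
                norm_num
              ·
                by_cases h8 : (6561:Int) ≥ d
                · simp only [pvScanLevels, if_neg h1, if_neg h2, if_neg h3, if_neg h4, if_neg h5, if_neg h6, if_neg h7, if_pos h8]
                  rw [pvALoop_step (show (3:Int)^1 < d by norm_num; omega), pvALoop_step (show (3:Int)^2 < d by norm_num; omega), pvALoop_step (show (3:Int)^3 < d by norm_num; omega), pvALoop_step (show (3:Int)^4 < d by norm_num; omega), pvALoop_step (show (3:Int)^5 < d by norm_num; omega), pvALoop_step (show (3:Int)^6 < d by norm_num; omega), pvALoop_step (show (3:Int)^7 < d by norm_num; omega), pvALoop_stop (show ¬ (3:Int)^8 < d by norm_num; omega)]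
                  norm_num
                ·
                  by_cases h9 : (19683:Int) ≥ d
                  · simp only [pvScanLevels, if_neg h1, if_neg h2, if_neg h3, if_neg h4, if_neg h5, if_neg h6, if_neg h7, if_neg h8, if_pos h9]
                    rw [pvALoop_step (show (3:Int)^1 < d by norm_num; omega), pvALoop_step (show (3:Int)^2 < d by norm_num; omega), pvALoop_step (show (3:Int)^3 < d by norm_num; omega), pvALoop_step (show (3:Int)^4 < d by norm_num; omega), pvALoop_step (show (3:Int)^5 < d by norm_num; omega), pvALoop_step (show (3:Int)^6 < d by norm_num; omega), pvALoop_step (show (3:Int)^7 < d by norm_num; omega), pvALoop_step (show (3:Int)^8 < d by norm_num; omega), pvALoop_stop (show ¬ (3:Int)^9 < d by norm_num; omega)]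
                    norm_num
                  ·
                    by_cases h10 : (59049:Int) ≥ d
                    · simp only [pvScanLevels, if_neg h1, if_neg h2, if_neg h3, if_neg h4, if_neg h5, if_neg h6, if_neg h7, if_neg h8, if_neg h9, if_pos h10]
                      rw [pvALoop_step (show (3:Int)^1 < d by norm_num; omega), pvALoop_step (show (3:Int)^2 < d by norm_num; omega), pvALoop_step (show (3:Int)^3 < d by norm_num; omega), pvALoop_step (show (3:Int)^4 < d by norm_num; omega), pvALoop_step (show (3:Int)^5 < d by norm_num; omega), pvALoop_step (show (3:Int)^6 < d by norm_num; omega), pvALoop_step (show (3:Int)^7 < d by norm_num; omega), pvALoop_step (show (3:Int)^8 < d by norm_num; omega), pvALoop_step (show (3:Int)^9 < d by norm_num; omega), pvALoop_stop (show ¬ (3:Int)^10 < d by norm_num; omega)]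
                      norm_num
                    ·
                      by_cases h11 : (177147:Int) ≥ d
                      · simp only [pvScanLevels, if_neg h1, if_neg h2, if_neg h3, if_neg h4, if_neg h5, if_neg h6, if_neg h7, if_neg h8, if_neg h9, if_neg h10, if_pos h11]
                        rw [pvALoop_step (show (3:Int)^1 < d by norm_num; omega), pvALoop_step (show (3:Int)^2 < d by norm_num; omega), pvALoop_step (show (3:Int)^3 < d by norm_num; omega), pvALoop_step (show (3:Int)^4 < d by norm_num; omega), pvALoop_step (show (3:Int)^5 < d by norm_num; omega), pvALoop_step (show (3:Int)^6 < d by norm_num; omega), pvALoop_step (show (3:Int)^7 < d by norm_num; omega), pvALoop_step (show (3:Int)^8 < d by norm_num; omega), pvALoop_step (show (3:Int)^9 < d by norm_num; omega), pvALoop_step (show (3:Int)^10 < d by norm_num; omega), pvALoop_stop (show ¬ (3:Int)^11 < d by norm_num; omega)]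
                        norm_num
                      ·
                        by_cases h12 : (531441:Int) ≥ d
                        · simp only [pvScanLevels, if_neg h1, if_neg h2, if_neg h3, if_neg h4, if_neg h5, if_neg h6, if_neg h7, if_neg h8, if_neg h9, if_neg h10, if_neg h11, if_pos h12]
                          rw [pvALoop_step (show (3:Int)^1 < d by norm_num; omega), pvALoop_step (show (3:Int)^2 < d by norm_num; omega), pvALoop_step (show (3:Int)^3 < d by norm_num; omega), pvALoop_step (show (3:Int)^4 < d by norm_num; omega), pvALoop_step (show (3:Int)^5 < d by norm_num; omega), pvALoop_step (show (3:Int)^6 < d by norm_num; omega), pvALoop_step (show (3:Int)^7 < d by norm_num; omega), pvALoop_step (show (3:Int)^8 < d by norm_num; omega), pvALoop_step (show (3:Int)^9 < d by norm_num; omega), pvALoop_step (show (3:Int)^10 < d by norm_num; omega), pvALoop_step (show (3:Int)^11 < d by norm_num; omega), pvALoop_stop (show ¬ (3:Int)^12 < d by norm_num; omega)]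
                          norm_num
                        ·
                          simp only [pvScanLevels, if_neg h1, if_neg h2, if_neg h3, if_neg h4, if_neg h5, if_neg h6, if_neg h7, if_neg h8, if_neg h9, if_neg h10, if_neg h11, if_neg h12]
                          rw [pvALoop_step (show (3:Int)^1 < d by norm_num; omega), pvALoop_step (show (3:Int)^2 < d by norm_num; omega), pvALoop_step (show (3:Int)^3 < d by norm_num; omega), pvALoop_step (show (3:Int)^4 < d by norm_num; omega), pvALoop_step (show (3:Int)^5 < d by norm_num; omega), pvALoop_step (show (3:Int)^6 < d by norm_num; omega), pvALoop_step (show (3:Int)^7 < d by norm_num; omega), pvALoop_step (show (3:Int)^8 < d by norm_num; omega), pvALoop_step (show (3:Int)^9 < d by norm_num; omega), pvALoop_step (show (3:Int)^10 < d by norm_num; omega), pvALoop_step (show (3:Int)^11 < d by norm_num; omega), pvALoop_step (show (3:Int)^12 < d by norm_num; omega)]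
                          norm_num
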